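-- pv_equiv track=rewrite | github.com/PapaAzor/AIE3-1 | Algorythm2v2.py | dist_fun
-- ===== SOURCE A (Python) =====
-- def dist_fun(x1,y1,x2,y2):
--     cur_x=x1
--     cur_y=y1
--     tar_x=x2
--     tar_y=y2
--     lenght=0
--     while cur_x!=tar_x:
--      while cur_y!=tar_y:
--         if tar_y>cur_y:
--             lenght+=1
--             cur_y+=1
--         if tar_y<cur_y:
--             lenght+=1
--             cur_y-=1
--      if tar_x>cur_x:
--             lenght+=1
--             cur_x+=1
--      if tar_x<cur_x:
--             lenght+=1
--             cur_x-=1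
--     return lenght
-- ===== SOURCE B (Python) =====
-- def dist_fun(x1, y1, x2, y2):
--     return abs(x2 - x1) + abs(y2 - y1)
-- ===== Notes on version B (the rewrite author's own statement) =====
-- stated objective: faster
-- what changed: Replaced the unit-stepping while loops with the closed-form Manhattan distance abs(x2-x1)+abs(y2-y1).
-- intended difference: When x1 == x2 but y1 != y2, A's outer loop never runs so A returns 0, ignoring the y-distance; B returns abs(y2-y1), the intended Manhattan distance. — e.g. on dist_fun(0, 0, 0, 1): A returns 0, B returns 1
import Mathlib
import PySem

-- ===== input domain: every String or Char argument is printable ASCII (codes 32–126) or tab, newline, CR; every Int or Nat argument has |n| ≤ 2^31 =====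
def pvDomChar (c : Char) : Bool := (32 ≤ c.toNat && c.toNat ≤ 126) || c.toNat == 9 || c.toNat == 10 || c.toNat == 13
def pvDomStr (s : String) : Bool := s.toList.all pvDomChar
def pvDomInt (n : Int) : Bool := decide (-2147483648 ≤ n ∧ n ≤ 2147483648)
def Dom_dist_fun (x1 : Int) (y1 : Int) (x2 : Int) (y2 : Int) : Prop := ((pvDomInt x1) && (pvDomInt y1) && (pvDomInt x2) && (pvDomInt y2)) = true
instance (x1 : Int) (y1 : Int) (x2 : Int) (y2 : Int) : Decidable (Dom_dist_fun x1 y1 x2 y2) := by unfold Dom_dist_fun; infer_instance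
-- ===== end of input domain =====

-- B replaces A's unit-stepping loops by the closed-form abs(x2-x1)+abs(y2-y1) (objective: faster).

-- ===== PORT A =====
-- Inner `while cur_y != tar_y` loop of A.  Python's body has two `if`s; when one fires
-- the other cannot fire on the updated cur_y, so each iteration is exactly one step
-- toward tar_y: ported branch for branch.  Returns the final (cur_y, lenght).
def pvInner (cur_y tar_y len : Int) : Int × Int :=
  if cur_y = tar_y then (cur_y, len)
  else if tar_y > cur_y then pvInner (cur_y + 1) tar_y (len + 1)
  else pvInner (cur_y - 1) tar_y (len + 1)
termination_by (tar_y - cur_y).natAbs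
decreasing_by all_goals omega

-- Outer `while cur_x != tar_x` loop of A; runs the inner loop, then the same two-`if` step.
def pvOuter (cur_x cur_y tar_x tar_y len : Int) : Int :=
  if cur_x = tar_x then len
  else if tar_x > cur_x then
    pvOuter (cur_x + 1) (pvInner cur_y tar_y len).1 tar_x tar_y ((pvInner cur_y tar_y len).2 + 1)
  else
    pvOuter (cur_x - 1) (pvInner cur_y tar_y len).1 tar_x tar_y ((pvInner cur_y tar_y len).2 + 1)
termination_by (tar_x - cur_x).natAbs
decreasing_by all_goals omega

def dist_fun (x1 : Int) (y1 : Int) (x2 : Int) (y2 : Int) : Int :=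
  pvOuter x1 y1 x2 y2 0

-- ===== PORT B =====
def dist_fun_alt (x1 : Int) (y1 : Int) (x2 : Int) (y2 : Int) : Int :=
  (x2 - x1).natAbs + (y2 - y1).natAbs

-- ===== PRECONDITION & SPEC =====
-- When x1 == x2 but y1 != y2, A's outer loop never runs so A returns 0, ignoring the
-- y-distance; B returns abs(y2-y1), the intended Manhattan distance.
def D_dist_fun (x1 : Int) (y1 : Int) (x2 : Int) (y2 : Int) : Prop := x1 = x2 ∧ y1 ≠ y2
instance (x1 : Int) (y1 : Int) (x2 : Int) (y2 : Int) : Decidable (D_dist_fun x1 y1 x2 y2) := by unfold D_dist_fun; infer_instance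

def Spec_dist_fun (x1 : Int) (y1 : Int) (x2 : Int) (y2 : Int) (out : Int) : Prop :=
  ¬ D_dist_fun x1 y1 x2 y2 → out = dist_fun_alt x1 y1 x2 y2
instance (x1 : Int) (y1 : Int) (x2 : Int) (y2 : Int) (out : Int) : Decidable (Spec_dist_fun x1 y1 x2 y2 out) := by unfold Spec_dist_fun; infer_instance

def pvDiffWitness_dist_fun : Int × Int × Int × Int := (0, 0, 0, 1)
def pvDiffWitnessOut_dist_fun : Int × Int := (0, 1)

-- ===== CLAIM =====
def Claim_unchanged_dist_fun : Prop := ∀ (x1 : Int) (y1 : Int) (x2 : Int) (y2 : Int), Dom_dist_fun x1 y1 x2 y2 → Spec_dist_fun x1 y1 x2 y2 (dist_fun x1 y1 x2 y2)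
def Claim_changed_dist_fun : Prop := Dom_dist_fun (pvDiffWitness_dist_fun.1) (pvDiffWitness_dist_fun.2.1) (pvDiffWitness_dist_fun.2.2.1) (pvDiffWitness_dist_fun.2.2.2) ∧ D_dist_fun (pvDiffWitness_dist_fun.1) (pvDiffWitness_dist_fun.2.1) (pvDiffWitness_dist_fun.2.2.1) (pvDiffWitness_dist_fun.2.2.2) ∧ dist_fun (pvDiffWitness_dist_fun.1) (pvDiffWitness_dist_fun.2.1) (pvDiffWitness_dist_fun.2.2.1) (pvDiffWitness_dist_fun.2.2.2) = pvDiffWitnessOut_dist_fun.1 ∧ dist_fun_alt (pvDiffWitness_dist_fun.1) (pvDiffWitness_dist_fun.2.1) (pvDiffWitness_dist_fun.2.2.1) (pvDiffWitness_dist_fun.2.2.2) = pvDiffWitnessOut_dist_fun.2 ∧ pvDiffWitnessOut_dist_fun.1 ≠ pvDiffWitnessOut_dist_fun.2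
def Claim_exact_dist_fun : Prop := ∀ (x1 : Int) (y1 : Int) (x2 : Int) (y2 : Int), Dom_dist_fun x1 y1 x2 y2 → D_dist_fun x1 y1 x2 y2 → dist_fun x1 y1 x2 y2 ≠ dist_fun_alt x1 y1 x2 y2

-- ===== LEMMAS AND PROOFS =====
theorem pvInner_eq (cur_y tar_y len : Int) :
    pvInner cur_y tar_y len = (tar_y, len + (tar_y - cur_y).natAbs) := by
  generalize hn : (tar_y - cur_y).natAbs = n
  induction n generalizing cur_y len with
  | zero =>
      have h : cur_y = tar_y := by omega
      rw [pvInner, if_pos h]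
      simp only [Prod.mk.injEq]
      omega
  | succ n ih =>
      have hne : cur_y ≠ tar_y := by omega
      rw [pvInner, if_neg hne]
      by_cases h2 : tar_y > cur_y
      · rw [if_pos h2, ih _ _ (by omega)]
        simp only [Prod.mk.injEq, true_and]
        omega
      · rw [if_neg h2, ih _ _ (by omega)]
        simp only [Prod.mk.injEq, true_and]
        omega

theorem pvOuter_eq (cur_x cur_y tar_x tar_y len : Int) (h : cur_x ≠ tar_x) :
    pvOuter cur_x cur_y tar_x tar_y len
      = len + (tar_x - cur_x).natAbs + (tar_y - cur_y).natAbs := by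
  generalize hn : (tar_x - cur_x).natAbs = n
  induction n generalizing cur_x cur_y len with
  | zero => omega
  | succ n ih =>
      rw [pvOuter, if_neg h, pvInner_eq]
      simp only
      by_cases h2 : tar_x > cur_x
      · rw [if_pos h2]
        by_cases hx : cur_x + 1 = tar_x
        · rw [pvOuter, if_pos hx]; omega
        · rw [ih _ _ _ hx (by omega)]; omega
      · rw [if_neg h2]
        by_cases hx : cur_x - 1 = tar_x
        · rw [pvOuter, if_pos hx]; omega
        · rw [ih _ _ _ hx (by omega)]; omega

theorem pvOuter_self (cur_y tar_x tar_y len : Int) :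
    pvOuter tar_x cur_y tar_x tar_y len = len := by
  rw [pvOuter, if_pos rfl]

-- ===== VERDICT =====
theorem dist_fun_spec : Claim_unchanged_dist_fun := by
  intro x1 y1 x2 y2 _ hD
  unfold D_dist_fun at hD
  unfold dist_fun dist_fun_alt
  by_cases hx : x1 = x2
  · have hy : y1 = y2 := by tauto
    subst hx; subst hy
    rw [pvOuter_self]
    omega
  · rw [pvOuter_eq _ _ _ _ _ hx]
    omega

theorem dist_fun_changed : Claim_changed_dist_fun := by
  unfold Claim_changed_dist_fun
  refine ⟨by decide, by decide, ?_, by decide, by decide⟩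
  show dist_fun 0 0 0 1 = 0
  unfold dist_fun
  rw [pvOuter_self]

theorem dist_fun_tight : Claim_exact_dist_fun := by
  intro x1 y1 x2 y2 _ hD
  obtain ⟨hx, hy⟩ := hD
  subst hx
  unfold dist_fun dist_fun_alt
  rw [pvOuter_self]
  omega
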